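-- pv_equiv track=rewrite | github.com/rupindermonga/euler4Palindrome | Euler4Palindrome.py | ndigit
-- ===== SOURCE A (Python) =====
-- def ndigit(n):
--     i = 1
--     bnum = 0
--     snum = 1
--     while i <= n :
--         bnum = bnum*10 +9
--         snum = snum*10
--         i += 1
--     return [bnum, snum//10]
-- ===== SOURCE B (Python) =====
-- def ndigit(n):
--     m = n if n > 0 else 0
--     p = 10 ** m
--     return [p - 1, p // 10]
-- ===== Notes on version B (the rewrite author's own statement) =====
-- stated objective: simpler
-- what changed: Replaces the while-loop digit accumulation with a closed-form power: largest = 10**m - 1, smallest = 10**m // 10 with m = max(n, 0).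
import Mathlib
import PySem

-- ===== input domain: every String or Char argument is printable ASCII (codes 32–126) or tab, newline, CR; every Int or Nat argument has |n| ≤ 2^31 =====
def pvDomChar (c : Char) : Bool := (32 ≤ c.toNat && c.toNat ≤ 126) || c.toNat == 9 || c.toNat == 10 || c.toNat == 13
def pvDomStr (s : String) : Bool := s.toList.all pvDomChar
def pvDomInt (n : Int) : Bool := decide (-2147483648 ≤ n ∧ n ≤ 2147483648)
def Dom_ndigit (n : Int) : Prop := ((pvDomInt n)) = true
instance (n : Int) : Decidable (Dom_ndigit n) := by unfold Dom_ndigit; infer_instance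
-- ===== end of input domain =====

-- B replaces A's while-loop with the closed form [10^max(n,0)-1, 10^max(n,0)//10] (objective: simpler).

-- ===== PORT A =====
-- the while-loop of A: state (i, bnum, snum), runs while i ≤ n
def ndigitLoop (n i bnum snum : Int) : Int × Int :=
  if i ≤ n then ndigitLoop n (i + 1) (bnum * 10 + 9) (snum * 10) else (bnum, snum)
termination_by (n + 1 - i).toNat
decreasing_by omega

def ndigit (n : Int) : List Int :=
  let r := ndigitLoop n 1 0 1
  [r.1, PySem.Int.floordiv r.2 10]

-- ===== PORT B =====
def ndigit_alt (n : Int) : List Int :=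
  let m : Int := if n > 0 then n else 0
  let p : Int := 10 ^ m.toNat
  [p - 1, PySem.Int.floordiv p 10]

-- ===== PRECONDITION & SPEC =====
def Spec_ndigit (n : Int) (out : List Int) : Prop := out = ndigit_alt n
instance (n : Int) (out : List Int) : Decidable (Spec_ndigit n out) := by unfold Spec_ndigit; infer_instance

-- ===== CLAIM (what is proved, stated in full; the proofs are below) =====
def Claim_equal_ndigit : Prop := ∀ (n : Int), Dom_ndigit n → Spec_ndigit n (ndigit n)

-- ===== LEMMAS AND PROOFS =====
theorem ndigitLoop_eq (k : Nat) : ∀ (n i bnum snum : Int), (n + 1 - i).toNat = k →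
    ndigitLoop n i bnum snum = (bnum * 10 ^ k + (10 ^ k - 1), snum * 10 ^ k) := by
  induction k with
  | zero =>
    intro n i bnum snum hk
    rw [ndigitLoop]
    have : ¬ i ≤ n := by omega
    simp [this]
  | succ k ih =>
    intro n i bnum snum hk
    rw [ndigitLoop]
    have h : i ≤ n := by omega
    simp only [h, if_true]
    rw [ih n (i + 1) _ _ (by omega)]
    apply Prod.ext <;> · simp only [pow_succ]; ring

-- ===== VERDICT (by name: the statement is the Claim_ definition above) =====
theorem ndigit_spec : Claim_equal_ndigit := by
  intro n _
  unfold Spec_ndigit ndigit ndigit_alt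
  rw [ndigitLoop_eq n.toNat n 1 0 1 (by omega)]
  have hm : (if n > 0 then n else 0).toNat = n.toNat := by split <;> omega
  simp [hm]
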